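-- pv_equiv track=rewrite | github.com/vittorio-prodomo/cocoyolo | src/cocoyolo/dataset.py | _split_name_from_json
-- ===== SOURCE A (Python) =====
-- from typing import Dict, List, Optional, Union
--
-- def _split_name_from_json(filename: str) -> Optional[str]:
--     """Extract a split name from a COCO JSON filename."""
--     lower = filename.lower()
--     for suffix, split in [
--         ("_train.json", "train"),
--         ("_train2017.json", "train"),
--         ("_val.json", "val"),
--         ("_val2017.json", "val"),
--         ("_validation.json", "val"),
--         ("_test.json", "test"),
--         ("_test2017.json", "test"),
--         ("_default.json", "train"),
--     ]:
--         if lower.endswith(suffix):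
--             return split
--     return None
-- ===== SOURCE B (Python) =====
-- _SPLITS = {
--     "train": "train", "train2017": "train",
--     "val": "val", "val2017": "val", "validation": "val",
--     "test": "test", "test2017": "test",
--     "default": "train",
-- }
--
-- def _split_name_from_json(filename):
--     """Extract a split name from a COCO JSON filename."""
--     lower = filename.lower()
--     if not lower.endswith(".json"):
--         return None
--     stem = lower[:-5]
--     i = stem.rfind("_")
--     if i == -1:
--         return None
--     return _SPLITS.get(stem[i + 1:])
-- ===== Notes on version B (the rewrite author's own statement) =====
-- stated objective: idiomatic
-- what changed: B replaces A's loop of eight endswith scans by stripping the json extension from the lowered name, extracting the token after the last underscore, and looking it up once in a dict.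
import Mathlib
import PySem

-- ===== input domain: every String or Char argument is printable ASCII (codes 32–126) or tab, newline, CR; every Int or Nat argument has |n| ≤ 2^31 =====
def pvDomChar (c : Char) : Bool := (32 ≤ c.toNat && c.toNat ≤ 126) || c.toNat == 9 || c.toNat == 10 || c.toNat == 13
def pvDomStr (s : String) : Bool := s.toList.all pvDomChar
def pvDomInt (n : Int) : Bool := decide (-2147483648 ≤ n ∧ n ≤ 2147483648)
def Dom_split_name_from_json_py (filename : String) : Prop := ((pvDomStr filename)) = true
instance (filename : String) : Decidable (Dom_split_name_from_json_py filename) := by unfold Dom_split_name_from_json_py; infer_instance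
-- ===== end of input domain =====

-- B replaces A's eight endswith scans by one extraction of the token after the last '_' of the lowered '.json'-stripped name and a single dict lookup; objective: idiomatic.


-- ===== PORT A =====
-- A's for-loop over the literal (suffix, split) table
def pvLoopA (lower : String) : List (String × String) → Option String
  | [] => none
  | (suffix, split) :: rest =>
      if PySem.Str.endswith lower suffix then some split else pvLoopA lower rest

def split_name_from_json_py (filename : String) : Option String :=
  let lower := PySem.Str.lower filename
  pvLoopA lower
    [("_train.json", "train"), ("_train2017.json", "train"),
     ("_val.json", "val"), ("_val2017.json", "val"), ("_validation.json", "val"),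
     ("_test.json", "test"), ("_test2017.json", "test"),
     ("_default.json", "train")]

-- ===== PORT B =====
-- B's module-level _SPLITS dict
def pvSplits : PySem.Dict String String :=
  PySem.Dict.mk
    [("train", "train"), ("train2017", "train"),
     ("val", "val"), ("val2017", "val"), ("validation", "val"),
     ("test", "test"), ("test2017", "test"),
     ("default", "train")]

def split_name_from_json_py_alt (filename : String) : Option String :=
  let lower := PySem.Str.lower filename
  if PySem.Str.endswith lower ".json" then
    let stem := PySem.Str.slice lower none (some (-5))
    let i := PySem.Str.rfind stem "_"
    if i == -1 then none
    else pvSplits.get? (PySem.Str.slice stem (some (i + 1)) none)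
  else none

-- ===== PRECONDITION & SPEC =====
def Spec_split_name_from_json_py (filename : String) (out : Option String) : Prop := out = split_name_from_json_py_alt filename
instance (filename : String) (out : Option String) : Decidable (Spec_split_name_from_json_py filename out) := by unfold Spec_split_name_from_json_py; infer_instance

-- ===== CLAIM (what is proved, stated in full; the proofs are below) =====
def Claim_equal_split_name_from_json_py : Prop := ∀ (filename : String), Dom_split_name_from_json_py filename → Spec_split_name_from_json_py filename (split_name_from_json_py filename)

-- ===== LEMMAS AND PROOFS =====

-- A's branch structure, moved to the List Char level
def pvChA (l : List Char) : Option String :=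
  if PySem.Chars.endswith l "_train.json".toList then some "train"
  else if PySem.Chars.endswith l "_train2017.json".toList then some "train"
  else if PySem.Chars.endswith l "_val.json".toList then some "val"
  else if PySem.Chars.endswith l "_val2017.json".toList then some "val"
  else if PySem.Chars.endswith l "_validation.json".toList then some "val"
  else if PySem.Chars.endswith l "_test.json".toList then some "test"
  else if PySem.Chars.endswith l "_test2017.json".toList then some "test"
  else if PySem.Chars.endswith l "_default.json".toList then some "train"
  else none

-- B's computation, moved to the List Char level
def pvChB (l : List Char) : Option String :=
  if PySem.Chars.endswith l ".json".toList then
    let stem := PySem.Chars.slice l none (some (-5))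
    let i := PySem.Chars.rfind stem ['_']
    if i == -1 then none
    else pvSplits.get? (String.ofList (PySem.Chars.slice stem (some (i + 1)) none))
  else none

lemma pvA_eq (f : String) : split_name_from_json_py f = pvChA (PySem.Chars.lower f.toList) := by
  simp only [split_name_from_json_py, pvLoopA, pvChA, PySem.Str.endswith_eq,
    PySem.Str.toList_lower]

lemma pvB_eq (f : String) : split_name_from_json_py_alt f = pvChB (PySem.Chars.lower f.toList) := by
  simp [split_name_from_json_py_alt, pvChB, PySem.Str.endswith_eq, PySem.Str.toList_lower,
    PySem.Str.rfind_eq, PySem.Str.slice]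

-- splitting a list at the LAST occurrence of a character
lemma pvLastSplit {c : Char} : ∀ {s : List Char}, c ∈ s → ∃ u v, s = u ++ c :: v ∧ c ∉ v := by
  intro s hs
  induction s with
  | nil => cases hs
  | cons a t ih =>
    by_cases ht : c ∈ t
    · obtain ⟨u, v, huv, hv⟩ := ih ht
      exact ⟨a :: u, v, by simp [huv], hv⟩
    · rcases List.mem_cons.1 hs with h | h
      · exact ⟨[], t, by simp [h], ht⟩
      · exact absurd h ht

-- rfind's scan finds nothing when '_' is absent
lemma pvGoNone {s : List Char} (h : '_' ∉ s) : ∀ j, PySem.Chars.rfind.go s ['_'] j = -1 := by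
  intro j
  induction j with
  | zero =>
    simp only [PySem.Chars.rfind.go]
    rw [if_neg]
    intro hp
    exact h ((List.isPrefixOf_iff_prefix.1 hp).subset (by simp))
  | succ j ih =>
    simp only [PySem.Chars.rfind.go]
    rw [if_neg, ih]
    intro hp
    exact h (List.drop_subset _ _ ((List.isPrefixOf_iff_prefix.1 hp).subset (by simp)))

-- rfind's scan stops at the last '_'
lemma pvGoLast {u v : List Char} (hv : '_' ∉ v) :
    ∀ j, u.length ≤ j → PySem.Chars.rfind.go (u ++ '_' :: v) ['_'] j = u.length := by
  intro j
  induction j with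
  | zero =>
    intro hu
    have hu0 : u = [] := List.eq_nil_of_length_eq_zero (Nat.le_zero.1 hu)
    subst hu0
    simp [PySem.Chars.rfind.go, List.isPrefixOf]
  | succ j ih =>
    intro hu
    rcases Nat.lt_or_ge j.succ u.length.succ with hlt | hge
    · have he : u.length = j + 1 := by omega
      simp only [PySem.Chars.rfind.go]
      rw [← he, List.drop_left, if_pos, he]
      simp [List.isPrefixOf]
    · have hle : u.length ≤ j := by omega
      simp only [PySem.Chars.rfind.go]
      rw [if_neg, ih hle]
      intro hp
      have := (List.isPrefixOf_iff_prefix.1 hp).subset (show '_' ∈ ['_'] by simp)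
      have hd : (u ++ '_' :: v).drop (j + 1) = v.drop (j - u.length) := by
        rw [List.drop_append, List.drop_of_length_le (by omega), List.nil_append,
          show j + 1 - u.length = (j - u.length) + 1 by omega, List.drop_succ_cons]
      rw [hd] at this
      exact hv (List.drop_subset _ _ this)

lemma pvRfindNone {s : List Char} (h : '_' ∉ s) : PySem.Chars.rfind s ['_'] = -1 :=
  pvGoNone h _

lemma pvRfindLast {u v : List Char} (hv : '_' ∉ v) :
    PySem.Chars.rfind (u ++ '_' :: v) ['_'] = (u.length : Int) := by
  unfold PySem.Chars.rfind
  rw [pvGoLast hv _ (by simp)]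

lemma pvSuffixCancel (a b t : List Char) : a ++ t <:+ b ++ t ↔ a <:+ b := by
  rw [← List.reverse_prefix, ← List.reverse_prefix (l₁ := a), List.reverse_append,
    List.reverse_append, List.prefix_append_right_inj]

-- '_'-free w is a suffix of u ++ '_' :: v after a '_' exactly when it IS the '_'-free tail v
lemma pvLastEq {w u v : List Char} (hw : '_' ∉ w) (hv : '_' ∉ v) :
    ('_' :: w <:+ u ++ '_' :: v) ↔ w = v := by
  constructor
  · intro h
    rcases List.suffix_or_suffix_of_suffix h (List.suffix_append u _) with h' | h'
    · rcases List.suffix_cons_iff.1 h' with h'' | h''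
      · simpa using h''
      · exact absurd (h''.subset (by simp)) hv
    · rcases List.suffix_cons_iff.1 h' with h'' | h''
      · simpa using h''.symm
      · exact absurd (h''.subset (by simp)) hw
  · rintro rfl
    exact List.suffix_append u _

lemma pvBeqOfList (s : String) (w : List Char) : (s == String.ofList w) = decide (s.toList = w) := by
  by_cases h : s.toList = w <;> simp_all [← String.toList_inj]

-- matching the token against the eight branches equals the dict lookup
lemma pvLookup (v : List Char) :
    (if "train".toList = v then some "train"
     else if "train2017".toList = v then some "train"
     else if "val".toList = v then some "val"
     else if "val2017".toList = v then some "val"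
     else if "validation".toList = v then some "val"
     else if "test".toList = v then some "test"
     else if "test2017".toList = v then some "test"
     else if "default".toList = v then some "train"
     else (none : Option String)) = pvSplits.get? (String.ofList v) := by
  by_cases h1 : "train".toList = v
  · subst h1; decide
  by_cases h2 : "train2017".toList = v
  · subst h2; decide
  by_cases h3 : "val".toList = v
  · subst h3; decide
  by_cases h4 : "val2017".toList = v
  · subst h4; decide
  by_cases h5 : "validation".toList = v
  · subst h5; decide
  by_cases h6 : "test".toList = v
  · subst h6; decide
  by_cases h7 : "test2017".toList = v
  · subst h7; decide
  by_cases h8 : "default".toList = v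
  · subst h8; decide
  simp_all [pvSplits, PySem.Dict.get?, pvBeqOfList]

lemma pvMain (l : List Char) : pvChA l = pvChB l := by
  by_cases hj : PySem.Chars.endswith l ".json".toList = true
  · obtain ⟨stem, hstem⟩ := (PySem.Chars.endswith_iff ..).1 hj
    have hslice : PySem.Chars.slice l none (some (-5)) = stem := by
      rw [PySem.Chars.slice_eq_listSlice, PySem.List.slice_to_neg_ofNat l 5 (by omega), ← hstem]
      simp
    have hEnds : ∀ w : List Char,
        (PySem.Chars.endswith l ('_' :: w ++ ".json".toList) = true ↔ '_' :: w <:+ stem) := by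
      intro w
      rw [PySem.Chars.endswith_iff, ← hstem,
        show ('_' :: w ++ ".json".toList) = ('_' :: w) ++ ".json".toList from rfl, pvSuffixCancel]
    by_cases hu : '_' ∈ stem
    · obtain ⟨u, v, huv, hv⟩ := pvLastSplit hu
      have hrf : PySem.Chars.rfind stem ['_'] = (u.length : Int) := by rw [huv]; exact pvRfindLast hv
      have hne : ((u.length : Int) == -1) = false := by simp
      have hkey : PySem.Chars.slice stem (some ((u.length : Int) + 1)) none = v := by
        rw [PySem.Chars.slice_eq_listSlice, PySem.List.slice_from stem (by omega), huv]
        rw [show ((u.length : Int) + 1).toNat = u.length + 1 by omega]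
        rw [List.drop_append, List.drop_of_length_le (by omega), List.nil_append,
          show u.length + 1 - u.length = 1 by omega, List.drop_one, List.tail_cons]
      have hE : ∀ w : List Char, '_' ∉ w →
          PySem.Chars.endswith l ('_' :: w ++ ".json".toList) = decide (w = v) := by
        intro w hw
        by_cases h : w = v
        · subst h
          have hsf : '_' :: w <:+ stem := by rw [huv]; exact (pvLastEq hw hv).2 rfl
          simpa using (hEnds w).2 hsf
        · have hns : ¬ ('_' :: w <:+ stem) := by
            rw [huv]; exact fun hc => h ((pvLastEq hw hv).1 hc)
          simp only [h, decide_false]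
          rw [Bool.eq_false_iff]
          exact fun hc => hns ((hEnds w).1 hc)
      have e1 : PySem.Chars.endswith l "_train.json".toList = decide ("train".toList = v) := by
        rw [show ("_train.json".toList : List Char) = '_' :: "train".toList ++ ".json".toList from by decide]
        exact hE _ (by decide)
      have e2 : PySem.Chars.endswith l "_train2017.json".toList = decide ("train2017".toList = v) := by
        rw [show ("_train2017.json".toList : List Char) = '_' :: "train2017".toList ++ ".json".toList from by decide]
        exact hE _ (by decide)
      have e3 : PySem.Chars.endswith l "_val.json".toList = decide ("val".toList = v) := by
        rw [show ("_val.json".toList : List Char) = '_' :: "val".toList ++ ".json".toList from by decide]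
        exact hE _ (by decide)
      have e4 : PySem.Chars.endswith l "_val2017.json".toList = decide ("val2017".toList = v) := by
        rw [show ("_val2017.json".toList : List Char) = '_' :: "val2017".toList ++ ".json".toList from by decide]
        exact hE _ (by decide)
      have e5 : PySem.Chars.endswith l "_validation.json".toList = decide ("validation".toList = v) := by
        rw [show ("_validation.json".toList : List Char) = '_' :: "validation".toList ++ ".json".toList from by decide]
        exact hE _ (by decide)
      have e6 : PySem.Chars.endswith l "_test.json".toList = decide ("test".toList = v) := by
        rw [show ("_test.json".toList : List Char) = '_' :: "test".toList ++ ".json".toList from by decide]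
        exact hE _ (by decide)
      have e7 : PySem.Chars.endswith l "_test2017.json".toList = decide ("test2017".toList = v) := by
        rw [show ("_test2017.json".toList : List Char) = '_' :: "test2017".toList ++ ".json".toList from by decide]
        exact hE _ (by decide)
      have e8 : PySem.Chars.endswith l "_default.json".toList = decide ("default".toList = v) := by
        rw [show ("_default.json".toList : List Char) = '_' :: "default".toList ++ ".json".toList from by decide]
        exact hE _ (by decide)
      rw [pvChA, pvChB, if_pos hj, e1, e2, e3, e4, e5, e6, e7, e8]
      simp only [hslice, hrf, hne, Bool.false_eq_true, if_false, hkey, decide_eq_true_eq]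
      exact pvLookup v
    · have hrf := pvRfindNone hu
      have hF : ∀ w : List Char,
          PySem.Chars.endswith l ('_' :: w ++ ".json".toList) = false := by
        intro w
        rw [Bool.eq_false_iff]
        exact fun hc => hu (((hEnds w).1 hc).subset (by simp))
      have e1 : PySem.Chars.endswith l "_train.json".toList = false := by
        rw [show ("_train.json".toList : List Char) = '_' :: "train".toList ++ ".json".toList from by decide]
        exact hF _
      have e2 : PySem.Chars.endswith l "_train2017.json".toList = false := by
        rw [show ("_train2017.json".toList : List Char) = '_' :: "train2017".toList ++ ".json".toList from by decide]
        exact hF _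
      have e3 : PySem.Chars.endswith l "_val.json".toList = false := by
        rw [show ("_val.json".toList : List Char) = '_' :: "val".toList ++ ".json".toList from by decide]
        exact hF _
      have e4 : PySem.Chars.endswith l "_val2017.json".toList = false := by
        rw [show ("_val2017.json".toList : List Char) = '_' :: "val2017".toList ++ ".json".toList from by decide]
        exact hF _
      have e5 : PySem.Chars.endswith l "_validation.json".toList = false := by
        rw [show ("_validation.json".toList : List Char) = '_' :: "validation".toList ++ ".json".toList from by decide]
        exact hF _
      have e6 : PySem.Chars.endswith l "_test.json".toList = false := by
        rw [show ("_test.json".toList : List Char) = '_' :: "test".toList ++ ".json".toList from by decide]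
        exact hF _
      have e7 : PySem.Chars.endswith l "_test2017.json".toList = false := by
        rw [show ("_test2017.json".toList : List Char) = '_' :: "test2017".toList ++ ".json".toList from by decide]
        exact hF _
      have e8 : PySem.Chars.endswith l "_default.json".toList = false := by
        rw [show ("_default.json".toList : List Char) = '_' :: "default".toList ++ ".json".toList from by decide]
        exact hF _
      rw [pvChA, pvChB, if_pos hj, e1, e2, e3, e4, e5, e6, e7, e8]
      simp only [hslice, hrf]
      simp
  · have hA : ∀ suf : List Char, ".json".toList <:+ suf → PySem.Chars.endswith l suf = false := by
      intro suf hs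
      rw [Bool.eq_false_iff]
      intro h
      exact hj ((PySem.Chars.endswith_iff ..).2 (hs.trans ((PySem.Chars.endswith_iff ..).1 h)))
    rw [pvChA, pvChB, if_neg hj, hA "_train.json".toList (by decide),
      hA "_train2017.json".toList (by decide), hA "_val.json".toList (by decide),
      hA "_val2017.json".toList (by decide), hA "_validation.json".toList (by decide),
      hA "_test.json".toList (by decide), hA "_test2017.json".toList (by decide),
      hA "_default.json".toList (by decide)]
    simp

-- ===== VERDICT (by name: the statement is the Claim_ definition above) =====
theorem split_name_from_json_py_spec : Claim_equal_split_name_from_json_py := by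
  intro f _
  unfold Spec_split_name_from_json_py
  rw [pvA_eq, pvB_eq, pvMain]
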